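-- pv_equiv track=rewrite | github.com/ryanpate/wordrise | wordrise_game_engine.py | get_added_letter
-- ===== SOURCE A (Python) =====
-- from collections import Counter
-- from typing import List, Dict, Optional, Tuple
--
-- def get_added_letter(base_word: str, new_word: str) -> Optional[str]:
--     """Get the letter that was added to create new_word"""
--     base_counter = Counter(base_word.lower())
--     new_counter = Counter(new_word.lower())
--
--     for letter, count in new_counter.items():
--         base_count = base_counter.get(letter, 0)
--         if count > base_count:
--             return letter
--
--     return None
-- ===== SOURCE B (Python) =====
-- def get_added_letter(base_word, new_word):
--     """Get the letter that was added to create new_word"""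
--     new_lower = new_word.lower()
--     new_sorted = sorted(new_lower)
--     base_sorted = sorted(base_word.lower())
--     # two-pointer merge over the two sorted char sequences: every character
--     # occurrence of new_sorted unmatched by base_sorted is a surplus letter
--     surplus = set()
--     i = 0
--     for c in new_sorted:
--         while i < len(base_sorted) and base_sorted[i] < c:
--             i += 1
--         if i < len(base_sorted) and base_sorted[i] == c:
--             i += 1
--         else:
--             surplus.add(c)
--     for c in new_lower:
--         if c in surplus:
--             return c
--     return None
-- ===== Notes on version B (the rewrite author's own statement) =====
-- stated objective: alternative
-- what changed: B replaces A's hash-counting (two Counters compared per distinct letter) by a sort-and-merge algorithm: it sorts both lowercased words and runs a two-pointer merge that matches each character occurrence of the new word against the base word, collecting unmatched characters as the surplus set, then returns the first character of new_word.lower() that lies in that set.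
import Mathlib
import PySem

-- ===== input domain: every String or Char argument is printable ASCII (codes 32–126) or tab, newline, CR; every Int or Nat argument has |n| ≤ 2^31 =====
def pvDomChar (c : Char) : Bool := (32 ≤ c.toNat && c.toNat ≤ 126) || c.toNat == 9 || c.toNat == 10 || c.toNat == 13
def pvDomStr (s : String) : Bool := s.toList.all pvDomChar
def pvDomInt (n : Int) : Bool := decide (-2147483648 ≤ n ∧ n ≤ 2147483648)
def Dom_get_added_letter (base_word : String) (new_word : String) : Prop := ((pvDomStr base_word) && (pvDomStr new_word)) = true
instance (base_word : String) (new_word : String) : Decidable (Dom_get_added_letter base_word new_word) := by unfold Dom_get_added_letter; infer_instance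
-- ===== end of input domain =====

-- B replaces A's Counter comparison by a sort-and-merge algorithm: both lowercased words are
-- sorted, a two-pointer merge collects the surplus characters, and the first character of
-- new_word.lower() in that set is returned (objective: alternative).


-- ===== PORT A =====
-- 'for letter, count in new_counter.items(): …; return None'
def getAddedLoopA (base_counter : PySem.Dict Char Int) : List (Char × Int) → Option String
  | [] => none
  | (letter, count) :: rest =>
    if count > base_counter.getD letter 0 then some (String.ofList [letter])
    else getAddedLoopA base_counter rest

def get_added_letter (base_word : String) (new_word : String) : Option String :=
  let base_counter := PySem.Dict.counter (PySem.Str.lower base_word).toList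
  let new_counter := PySem.Dict.counter (PySem.Str.lower new_word).toList
  getAddedLoopA base_counter new_counter.items

-- ===== PORT B =====
-- 'while i < len(base_sorted) and base_sorted[i] < c: i += 1'
def skipLt (bs : List Char) (c : Char) (i : Nat) : Nat :=
  if h : i < bs.length then
    if bs[i] < c then skipLt bs c (i + 1) else i
  else i
termination_by bs.length - i

-- 'for c in new_sorted: …' — the two-pointer merge collecting the surplus set
def mergeLoop (bs : List Char) : List Char → Nat → PySem.Set Char → PySem.Set Char
  | [], _, s => s
  | c :: ns, i, s =>
    let i' := skipLt bs c i
    if h : i' < bs.length then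
      if bs[i'] = c then mergeLoop bs ns (i' + 1) s
      else mergeLoop bs ns i' (PySem.Set.add s c)
    else mergeLoop bs ns i' (PySem.Set.add s c)

-- 'for c in new_lower: if c in surplus: return c; return None'
def findScan (surplus : PySem.Set Char) : List Char → Option String
  | [] => none
  | c :: rest =>
    if PySem.Set.contains surplus c then some (String.ofList [c])
    else findScan surplus rest

def get_added_letter_alt (base_word : String) (new_word : String) : Option String :=
  let new_lower := (PySem.Str.lower new_word).toList
  let new_sorted := PySem.List.sorted new_lower (fun x => x) false
  let base_sorted := PySem.List.sorted (PySem.Str.lower base_word).toList (fun x => x) false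
  let surplus := mergeLoop base_sorted new_sorted 0 PySem.Set.empty
  findScan surplus new_lower

-- ===== PRECONDITION & SPEC =====
def Spec_get_added_letter (base_word : String) (new_word : String) (out : Option String) : Prop := out = get_added_letter_alt base_word new_word
instance (base_word : String) (new_word : String) (out : Option String) : Decidable (Spec_get_added_letter base_word new_word out) := by unfold Spec_get_added_letter; infer_instance

-- ===== CLAIM (what is proved, stated in full; the proofs are below) =====
def Claim_equal_get_added_letter : Prop := ∀ (base_word : String) (new_word : String), Dom_get_added_letter base_word new_word → Spec_get_added_letter base_word new_word (get_added_letter base_word new_word)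

-- ===== LEMMAS AND PROOFS =====

-- A's loop is a find? over the items list, mapped to a one-char string.
theorem loopA_eq_find? (d : PySem.Dict Char Int) (l : List (Char × Int)) :
    getAddedLoopA d l
      = (l.find? (fun p => p.2 > d.getD p.1 0)).map (fun p => String.ofList [p.1]) := by
  induction l with
  | nil => rfl
  | cons p rest ih =>
    obtain ⟨letter, count⟩ := p
    simp only [getAddedLoopA, List.find?]
    by_cases h : count > d.getD letter 0
    · simp [h]
    · simp [h, ih]

-- 'c in surplus' is membership in the set
theorem contains_eq_mem (sp : PySem.Set Char) (c : Char) :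
    PySem.Set.contains sp c = decide (c ∈ sp) := by
  simp [PySem.Set.contains]

-- B's final scan is a find? over new_lower, mapped to a one-char string.
theorem findScan_eq_find? (sp : PySem.Set Char) (l : List Char) :
    findScan sp l
      = (l.find? (fun c => PySem.Set.contains sp c)).map (fun c => String.ofList [c]) := by
  induction l with
  | nil => rfl
  | cons c rest ih =>
    simp only [findScan, List.find?, contains_eq_mem]
    by_cases h : c ∈ sp
    · simp [h]
    · simp [h, ih]

-- Discarding an element the predicate rejects does not change find?.
theorem find?_discard {p : Char → Bool} (x : Char) (hx : p x = false) (s : List Char) :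
    List.find? p (PySem.Set.discard s x) = List.find? p s := by
  induction s with
  | nil => rfl
  | cons y ys ih =>
    simp only [PySem.Set.discard, List.filter] at *
    by_cases hyx : y = x
    · subst hyx
      simp [hx, ih]
    · have : (!(y == x)) = true := by simp [hyx]
      simp only [this, List.find?]
      by_cases hy : p y
      · simp [hy]
      · simp [hy] at *; exact ih

-- find? over the ordered dedup (set of first occurrences) equals find? over the raw list.
theorem find?_ofList (p : Char → Bool) (xs : List Char) :
    List.find? p (PySem.Set.ofList xs) = List.find? p xs := by
  induction xs with
  | nil => rfl
  | cons x xs ih =>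
    rw [PySem.Set.ofList_cons]
    simp only [List.find?]
    by_cases hx : p x
    · simp [hx]
    · simp only [hx]
      rw [find?_discard x (by simpa using hx), ih]

-- the inner while loop stops at or past i
theorem skipLt_ge (bs : List Char) (c : Char) (i : Nat) : i ≤ skipLt bs c i := by
  unfold skipLt
  split
  · split
    · exact le_trans (Nat.le_succ i) (skipLt_ge bs c (i + 1))
    · exact le_refl i
  · exact le_refl i
termination_by bs.length - i

-- where the while loop stops, the element (if any) is not < c
theorem skipLt_stop (bs : List Char) (c : Char) (i : Nat)
    (h : skipLt bs c i < bs.length) : ¬ bs[skipLt bs c i] < c := by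
  by_cases hi : i < bs.length
  · by_cases hlt : bs[i] < c
    · have he : skipLt bs c i = skipLt bs c (i + 1) := by rw [skipLt]; simp [hi, hlt]
      simp only [he] at h ⊢
      exact skipLt_stop bs c (i + 1) h
    · have he : skipLt bs c i = i := by rw [skipLt]; simp [hi, hlt]
      simp only [he] at h ⊢
      exact hlt
  · have he : skipLt bs c i = i := by rw [skipLt]; simp [hi]
    simp only [he] at h
    exact absurd h hi
termination_by bs.length - i

-- only elements < c are skipped, so counts of characters ≥ c are preserved
theorem skipLt_count (bs : List Char) (c : Char) (i : Nat) (c' : Char) (hcc : c ≤ c') :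
    (bs.drop i).count c' = (bs.drop (skipLt bs c i)).count c' := by
  unfold skipLt
  split
  · rename_i hi
    by_cases hlt : bs[i] < c
    · simp only [if_pos hlt]
      rw [List.drop_eq_getElem_cons hi, List.count_cons]
      have : ¬ bs[i] = c' := fun he => absurd (lt_of_lt_of_le hlt hcc) (by simp [he])
      simp only [beq_iff_eq, this, if_false]
      exact skipLt_count bs c (i + 1) c' hcc
    · simp [hlt]
  · simp
termination_by bs.length - i

-- a sorted list whose head is > c contains no c
theorem count_zero_of_sorted_cons (x : Char) (xs : List Char) (c : Char)
    (hs : (x :: xs).Pairwise (· ≤ ·)) (hx : c < x) : (x :: xs).count c = 0 := by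
  refine List.count_eq_zero.2 (fun hmem => ?_)
  rcases List.mem_cons.1 hmem with h | h
  · exact absurd hx (by simp [h])
  · exact absurd (lt_of_lt_of_le hx ((List.pairwise_cons.1 hs).1 _ h)) (lt_irrefl _)

-- MAIN INVARIANT of the merge: a character is in the surplus set iff it was there already or
-- its count in the remaining new characters exceeds its count in the remaining base characters.
theorem mem_mergeLoop (bs : List Char) (hbs : bs.Pairwise (· ≤ ·)) :
    ∀ (ns : List Char), ns.Pairwise (· ≤ ·) → ∀ (i : Nat) (s : PySem.Set Char) (c : Char),
      (c ∈ mergeLoop bs ns i s ↔ c ∈ s ∨ ns.count c > (bs.drop i).count c) := by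
  intro ns
  induction ns with
  | nil =>
    intro _ i s c
    simp [mergeLoop]
  | cons c0 ns ih =>
    intro hns i s c
    have hns' : ns.Pairwise (· ≤ ·) := (List.pairwise_cons.1 hns).2
    have hns0 : ∀ x ∈ ns, c0 ≤ x := (List.pairwise_cons.1 hns).1
    have hdropsorted : ∀ j, (bs.drop j).Pairwise (· ≤ ·) :=
      fun j => hbs.sublist (List.drop_sublist j bs)
    have hcount0 : (bs.drop i).count c0 = (bs.drop (skipLt bs c0 i)).count c0 :=
      skipLt_count bs c0 i c0 (le_refl _)
    simp only [mergeLoop]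
    set i' := skipLt bs c0 i with hi'
    by_cases hlen : i' < bs.length
    · simp only [dif_pos hlen]
      by_cases heq : bs[i'] = c0
      · -- matched occurrence: consume base_sorted[i']
        simp only [if_pos heq]
        rw [ih hns' (i' + 1) s c]
        have hsplit : bs.drop i' = bs[i'] :: bs.drop (i' + 1) := List.drop_eq_getElem_cons hlen
        by_cases hc : c = c0
        · subst hc
          have : (bs.drop i').count c = (bs.drop (i' + 1)).count c + 1 := by
            rw [hsplit, List.count_cons]; simp [heq]
          constructor
          · rintro (h | h)
            · exact Or.inl h
            · refine Or.inr ?_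
              rw [hcount0, this, List.count_cons]
              simp; omega
          · rintro (h | h)
            · exact Or.inl h
            · refine Or.inr ?_
              rw [hcount0, this] at h
              simp only [List.count_cons, beq_self_eq_true, if_true] at h
              omega
        · -- c ≠ c0
          by_cases hlt : c < c0
          · -- c cannot occur in ns at all
            have hzero : ns.count c = 0 := List.count_eq_zero.2 (fun hm =>
              absurd (lt_of_lt_of_le hlt (hns0 c hm)) (lt_irrefl _))
            have hzero' : (c0 :: ns).count c = 0 := by
              rw [List.count_cons]; simp [hzero, Ne.symm hc]
            constructor
            · rintro (h | h)
              · exact Or.inl h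
              · omega
            · rintro (h | h)
              · exact Or.inl h
              · omega
          · have hge : c0 ≤ c := le_of_not_gt hlt
            have hcnt : (bs.drop i).count c = (bs.drop i').count c :=
              skipLt_count bs c0 i c hge
            have : (bs.drop i').count c = (bs.drop (i' + 1)).count c := by
              rw [hsplit, List.count_cons]
              simp [heq, Ne.symm hc]
            rw [hcnt, this, List.count_cons]
            simp [Ne.symm hc]
      · -- unmatched: bs[i'] > c0, record c0 as surplus
        simp only [if_neg heq]
        rw [ih hns' i' (PySem.Set.add s c0) c, PySem.Set.mem_add]
        have hgt : c0 < bs[i'] :=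
          lt_of_le_of_ne (le_of_not_gt (skipLt_stop bs c0 i hlen)) (fun h => heq h.symm)
        have hsplit : bs.drop i' = bs[i'] :: bs.drop (i' + 1) := List.drop_eq_getElem_cons hlen
        have hzero0 : (bs.drop i').count c0 = 0 := by
          rw [hsplit]
          exact count_zero_of_sorted_cons _ _ c0 (hsplit ▸ hdropsorted i') hgt
        by_cases hc : c = c0
        · subst hc
          have : (bs.drop i).count c = 0 := by omega
          constructor
          · intro _
            refine Or.inr ?_
            rw [this, List.count_cons]; simp
          · intro _
            exact Or.inl (Or.inr rfl)
        · by_cases hlt : c < c0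
          · have hzero : ns.count c = 0 := List.count_eq_zero.2 (fun hm =>
              absurd (lt_of_lt_of_le hlt (hns0 c hm)) (lt_irrefl _))
            have hzero' : (c0 :: ns).count c = 0 := by
              rw [List.count_cons]; simp [hzero, Ne.symm hc]
            constructor
            · rintro (h | h)
              · rcases h with h | h
                · exact Or.inl h
                · exact absurd h hc
              · omega
            · rintro (h | h)
              · exact Or.inl (Or.inl h)
              · omega
          · have hge : c0 ≤ c := le_of_not_gt hlt
            have hcnt : (bs.drop i).count c = (bs.drop i').count c :=
              skipLt_count bs c0 i c hge
            rw [hcnt, List.count_cons]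
            simp only [beq_iff_eq, if_neg (Ne.symm hc), Nat.add_zero]
            constructor
            · rintro (h | h)
              · rcases h with h | h
                · exact Or.inl h
                · exact absurd h hc
              · exact Or.inr h
            · rintro (h | h)
              · exact Or.inl (Or.inl h)
              · exact Or.inr h
    · -- base exhausted: every remaining new character is surplus
      simp only [dif_neg hlen]
      rw [ih hns' i' (PySem.Set.add s c0) c, PySem.Set.mem_add]
      have hnil : bs.drop i' = [] := List.drop_eq_nil_of_le (le_of_not_gt hlen)
      have hnil' : (bs.drop i).count c0 = 0 := by rw [hcount0, hnil]; rfl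
      by_cases hc : c = c0
      · subst hc
        constructor
        · intro _
          refine Or.inr ?_
          rw [hnil', List.count_cons]; simp
        · intro _
          exact Or.inl (Or.inr rfl)
      · by_cases hlt : c < c0
        · have hzero : ns.count c = 0 := List.count_eq_zero.2 (fun hm =>
            absurd (lt_of_lt_of_le hlt (hns0 c hm)) (lt_irrefl _))
          have hzero' : (c0 :: ns).count c = 0 := by
            rw [List.count_cons]; simp [hzero, Ne.symm hc]
          constructor
          · rintro (h | h)
            · rcases h with h | h
              · exact Or.inl h
              · exact absurd h hc
            · rw [hnil] at h; simp [hzero] at h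
          · rintro (h | h)
            · exact Or.inl (Or.inl h)
            · omega
        · have hge : c0 ≤ c := le_of_not_gt hlt
          have hcnt : (bs.drop i).count c = (bs.drop i').count c :=
            skipLt_count bs c0 i c hge
          rw [hcnt, List.count_cons]
          simp only [beq_iff_eq, if_neg (Ne.symm hc), Nat.add_zero]
          constructor
          · rintro (h | h)
            · rcases h with h | h
              · exact Or.inl h
              · exact absurd h hc
            · exact Or.inr h
          · rintro (h | h)
            · exact Or.inl (Or.inl h)
            · exact Or.inr h

-- ===== VERDICT (by name: the statement is the Claim_ definition above) =====
theorem get_added_letter_spec : Claim_equal_get_added_letter := by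
  intro base_word new_word _
  show get_added_letter base_word new_word = get_added_letter_alt base_word new_word
  unfold get_added_letter get_added_letter_alt
  set bl := (PySem.Str.lower base_word).toList with hbl
  set nl := (PySem.Str.lower new_word).toList with hnl
  set ns := PySem.List.sorted nl (fun x => x) false with hns
  set bs := PySem.List.sorted bl (fun x => x) false with hbs
  set sp := mergeLoop bs ns 0 PySem.Set.empty with hsp
  rw [loopA_eq_find?, findScan_eq_find?, PySem.Dict.items_counter, List.find?_map]
  have hmem : ∀ c : Char, (c ∈ sp ↔ (nl.count c : Int) > (bl.count c : Int)) := by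
    intro c
    rw [hsp, mem_mergeLoop bs (PySem.List.sorted_pairwise bl (fun x => x))
          ns (PySem.List.sorted_pairwise nl (fun x => x)) 0 PySem.Set.empty c]
    have h1 : ns.count c = nl.count c := (PySem.List.sorted_perm nl (fun x => x) false).count_eq c
    have h2 : bs.count c = bl.count c := (PySem.List.sorted_perm bl (fun x => x) false).count_eq c
    simp [PySem.Set.empty, h1, h2]
  have hpredA : ((fun (p : Char × Int) => decide (p.2 > (PySem.Dict.counter bl).getD p.1 0)) ∘
      (fun k => (k, (nl.count k : Int)))) = ((fun c => decide ((nl.count c : Int) > (bl.count c : Int))) : Char → Bool) := by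
    funext c
    simp [PySem.Dict.getD_counter]
  have hpredB : ((fun c => PySem.Set.contains sp c) : Char → Bool)
      = ((fun c => decide ((nl.count c : Int) > (bl.count c : Int))) : Char → Bool) := by
    funext c
    simp [PySem.Set.contains, hmem c]
  rw [hpredA, hpredB, find?_ofList]
  cases List.find? (fun c => decide ((nl.count c : Int) > (bl.count c : Int))) nl <;> rfl
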